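-- pv_equiv track=rewrite | github.com/giovannicelotto/ggHbb | flatter/categorizeQCDevents.py | get_hard_process
-- ===== SOURCE A (Python) =====
-- IS_HARD_PROCESS = 128
--
-- def has_flag(flags, bit):
--     return (flags & bit) != 0
--
-- def get_hard_process(pdg, status, flags):
--
--     # incoming
--     incoming = [
--         pdg[i] for i in range(len(pdg))
--         if (status[i] == 21 and has_flag(flags[i], IS_HARD_PROCESS))
--     ]
--
--     # outgoing ME particles
--     outgoing = [
--         pdg[i] for i in range(len(pdg))
--         if (status[i] == 23 and has_flag(flags[i], IS_HARD_PROCESS))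
--     ]
--
--     def label(p):
--         if abs(p) in [1,2,3,4,5,6]: return "q"
--         if p == 21: return "g"
--         return "X"
--
--     initial = "".join(sorted(label(p) for p in incoming))
--     final   = "".join(sorted(label(p) for p in outgoing))
--
--     return initial, final
-- ===== SOURCE B (Python) =====
-- def get_hard_process(pdg, status, flags):
--     iX = ig = iq = fX = fg = fq = 0
--     for i in range(len(pdg)):
--         if flags[i] & 128:
--             p = pdg[i]
--             c = "q" if 1 <= abs(p) <= 6 else ("g" if p == 21 else "X")
--             if status[i] == 21:
--                 if c == "q": iq += 1
--                 elif c == "g": ig += 1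
--                 else: iX += 1
--             elif status[i] == 23:
--                 if c == "q": fq += 1
--                 elif c == "g": fg += 1
--                 else: fX += 1
--     return ("X" * iX + "g" * ig + "q" * iq, "X" * fX + "g" * fg + "q" * fq)
-- ===== Notes on version B (the rewrite author's own statement) =====
-- stated objective: alternative
-- what changed: One tabulating pass over the indices keeps six label counters and the two strings are emitted by counting sort ('X'*c + 'g'*c + 'q'*c), replacing A's two filtering comprehensions plus two comparison sorts.
-- outside the precondition, e.g. on get_hard_process([3, 2, 6], [3363, 2, 20], []): A returns ('', ''), B raises IndexError
import Mathlib
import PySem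

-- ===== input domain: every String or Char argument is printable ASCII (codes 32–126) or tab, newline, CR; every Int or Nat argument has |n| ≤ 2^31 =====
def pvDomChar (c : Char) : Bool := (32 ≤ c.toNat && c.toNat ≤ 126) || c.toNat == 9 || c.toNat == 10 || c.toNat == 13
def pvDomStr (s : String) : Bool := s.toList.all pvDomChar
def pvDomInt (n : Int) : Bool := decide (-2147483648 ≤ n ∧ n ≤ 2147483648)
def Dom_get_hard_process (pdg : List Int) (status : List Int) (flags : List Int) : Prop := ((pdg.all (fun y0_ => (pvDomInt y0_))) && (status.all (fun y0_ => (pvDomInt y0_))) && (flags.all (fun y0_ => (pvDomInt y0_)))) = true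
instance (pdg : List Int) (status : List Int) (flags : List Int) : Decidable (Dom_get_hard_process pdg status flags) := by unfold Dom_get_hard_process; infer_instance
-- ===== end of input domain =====

-- B replaces A's two filtering comprehensions plus two comparison sorts by a single
-- counting pass over the indices and a counting-sort emit of the two label strings.

-- ===== PORT A =====
def has_flag (flags : Int) (bit : Int) : Bool := PySem.Int.band flags bit != 0

def pvLabelA (p : Int) : String :=
  if ([1, 2, 3, 4, 5, 6] : List Int).contains |p| then "q"
  else if p = 21 then "g"
  else "X"

def get_hard_process (pdg : List Int) (status : List Int) (flags : List Int) : String × String :=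
  let incoming :=
    ((PySem.List.pyRange 0 pdg.length 1).filter
      (fun i => PySem.List.pyGetD status i 0 == 21 && has_flag (PySem.List.pyGetD flags i 0) 128)).map
      (fun i => PySem.List.pyGetD pdg i 0)
  let outgoing :=
    ((PySem.List.pyRange 0 pdg.length 1).filter
      (fun i => PySem.List.pyGetD status i 0 == 23 && has_flag (PySem.List.pyGetD flags i 0) 128)).map
      (fun i => PySem.List.pyGetD pdg i 0)
  let initial := PySem.Str.join "" (PySem.List.sorted (incoming.map pvLabelA) (fun x => x) false)
  let final := PySem.Str.join "" (PySem.List.sorted (outgoing.map pvLabelA) (fun x => x) false)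
  (initial, final)

-- ===== PORT B =====
def pvStepB (pdg status flags : List Int) (s : (Nat × Nat × Nat) × (Nat × Nat × Nat)) (i : Int) :
    (Nat × Nat × Nat) × (Nat × Nat × Nat) :=
  if PySem.Int.band (PySem.List.pyGetD flags i 0) 128 != 0 then
    let p := PySem.List.pyGetD pdg i 0
    let c : String := if 1 ≤ |p| ∧ |p| ≤ 6 then "q" else if p = 21 then "g" else "X"
    if PySem.List.pyGetD status i 0 = 21 then
      if c = "q" then ((s.1.1, s.1.2.1, s.1.2.2 + 1), s.2)
      else if c = "g" then ((s.1.1, s.1.2.1 + 1, s.1.2.2), s.2)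
      else ((s.1.1 + 1, s.1.2.1, s.1.2.2), s.2)
    else if PySem.List.pyGetD status i 0 = 23 then
      if c = "q" then (s.1, (s.2.1, s.2.2.1, s.2.2.2 + 1))
      else if c = "g" then (s.1, (s.2.1, s.2.2.1 + 1, s.2.2.2))
      else (s.1, (s.2.1 + 1, s.2.2.1, s.2.2.2))
    else s
  else s

def pvEmit (t : Nat × Nat × Nat) : String :=
  String.ofList (List.replicate t.1 'X' ++ List.replicate t.2.1 'g' ++ List.replicate t.2.2 'q')

def get_hard_process_alt (pdg : List Int) (status : List Int) (flags : List Int) : String × String :=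
  let s := (PySem.List.pyRange 0 pdg.length 1).foldl (pvStepB pdg status flags) ((0, 0, 0), (0, 0, 0))
  (pvEmit s.1, pvEmit s.2)

-- ===== PRECONDITION & SPEC =====
-- Pre_ excludes inputs where status or flags is shorter than pdg: there Python A raises IndexError,
-- except when short-circuit evaluation of 'status[i]==21 and has_flag(flags[i],...)' lets A skip the
-- missing flags entries and return, where B's single pass (which reads flags[i] first) itself raises.
def Pre_get_hard_process (pdg : List Int) (status : List Int) (flags : List Int) : Prop :=
  pdg.length ≤ status.length ∧ pdg.length ≤ flags.length
instance (pdg : List Int) (status : List Int) (flags : List Int) : Decidable (Pre_get_hard_process pdg status flags) := by unfold Pre_get_hard_process; infer_instance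

def pvWitness_get_hard_process : List Int × List Int × List Int :=
  ([2, 21, 5, -5, 22], [21, 21, 23, 23, 23], [128, 129, 128, 0, 128])

def Spec_get_hard_process (pdg : List Int) (status : List Int) (flags : List Int) (out : String × String) : Prop := out = get_hard_process_alt pdg status flags
instance (pdg : List Int) (status : List Int) (flags : List Int) (out : String × String) : Decidable (Spec_get_hard_process pdg status flags out) := by unfold Spec_get_hard_process; infer_instance

-- ===== CLAIM (what is proved, stated in full; the proofs are below) =====
def Claim_equal_get_hard_process : Prop := ∀ (pdg : List Int) (status : List Int) (flags : List Int), Dom_get_hard_process pdg status flags → Pre_get_hard_process pdg status flags → Spec_get_hard_process pdg status flags (get_hard_process pdg status flags)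

-- ===== LEMMAS AND PROOFS =====

-- label counted over A's filtered-then-labelled list
def pvCnt (pdg status flags : List Int) (st : Int) (c : String) (L : List Int) : Nat :=
  (((L.filter (fun i => PySem.List.pyGetD status i 0 == st && has_flag (PySem.List.pyGetD flags i 0) 128)).map
      (fun i => PySem.List.pyGetD pdg i 0)).map pvLabelA).count c

theorem pvContains_iff (a : Int) :
    (([1, 2, 3, 4, 5, 6] : List Int).contains a = true) ↔ (1 ≤ a ∧ a ≤ 6) := by
  simp
  omega

theorem pvLabB_eq (p : Int) :
    (if 1 ≤ |p| ∧ |p| ≤ 6 then ("q" : String) else if p = 21 then "g" else "X") = pvLabelA p := by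
  unfold pvLabelA
  by_cases h : 1 ≤ |p| ∧ |p| ≤ 6
  · rw [if_pos h, if_pos ((pvContains_iff _).mpr h)]
  · rw [if_neg h, if_neg (fun hc => h ((pvContains_iff _).mp hc))]

theorem pvLabelA_cases (p : Int) : pvLabelA p = "X" ∨ pvLabelA p = "g" ∨ pvLabelA p = "q" := by
  unfold pvLabelA; split_ifs <;> simp

theorem pvLoop (pdg status flags : List Int) (L : List Int)
    (s : (Nat × Nat × Nat) × (Nat × Nat × Nat)) :
    L.foldl (pvStepB pdg status flags) s =
      ((s.1.1 + pvCnt pdg status flags 21 "X" L,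
        s.1.2.1 + pvCnt pdg status flags 21 "g" L,
        s.1.2.2 + pvCnt pdg status flags 21 "q" L),
       (s.2.1 + pvCnt pdg status flags 23 "X" L,
        s.2.2.1 + pvCnt pdg status flags 23 "g" L,
        s.2.2.2 + pvCnt pdg status flags 23 "q" L)) := by
  induction L generalizing s with
  | nil => simp [pvCnt]
  | cons i L ih =>
    rw [List.foldl_cons, ih]
    unfold pvCnt
    simp only [List.filter_cons]
    by_cases hf : (PySem.Int.band (PySem.List.pyGetD flags i 0) 128 != 0) = true
    · rcases pvLabelA_cases (PySem.List.pyGetD pdg i 0) with hl | hl | hl <;>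
      · by_cases h21 : PySem.List.pyGetD status i 0 = 21
        · have h23 : ¬ PySem.List.pyGetD status i 0 = 23 := by omega
          simp [pvStepB, has_flag, hf, h21, h23, pvLabB_eq, hl, pvCnt, List.count_cons]
          omega
        · by_cases h23 : PySem.List.pyGetD status i 0 = 23
          · simp [pvStepB, has_flag, hf, h21, h23, pvLabB_eq, hl, pvCnt, List.count_cons]
            omega
          · simp [pvStepB, has_flag, hf, h21, h23, pvCnt]
    · simp [pvStepB, has_flag, hf, pvCnt]

theorem pvSortJoin (ls : List String) (h : ∀ x ∈ ls, x = "X" ∨ x = "g" ∨ x = "q") :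
    PySem.Str.join "" (PySem.List.sorted ls (fun x => x) false) =
      String.ofList (List.replicate (ls.count "X") 'X' ++ List.replicate (ls.count "g") 'g' ++
        List.replicate (ls.count "q") 'q') := by
  set ys : List String := List.replicate (ls.count "X") "X" ++ List.replicate (ls.count "g") "g" ++
    List.replicate (ls.count "q") "q" with hys
  have hperm : ys.Perm ls := by
    rw [List.perm_iff_count]
    intro a
    by_cases hX : a = "X"
    · subst hX; simp [hys, List.count_append, List.count_replicate]
    · by_cases hg : a = "g"
      · subst hg; simp [hys, List.count_append, List.count_replicate]
      · by_cases hq : a = "q"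
        · subst hq; simp [hys, List.count_append, List.count_replicate]
        · have h0 : ls.count a = 0 := by
            refine List.count_eq_zero.mpr (fun hm => ?_)
            rcases h a hm with rfl | rfl | rfl <;> simp_all
          rw [h0]
          simp [hys, List.count_append, List.count_replicate]
          exact ⟨fun h' => absurd h'.symm hX, fun h' => absurd h'.symm hg,
            fun h' => absurd h'.symm hq⟩
  have hXg : ("X" : String) ≤ "g" := by rw [String.le_iff_toList_le]; decide
  have hXq : ("X" : String) ≤ "q" := by rw [String.le_iff_toList_le]; decide
  have hgq : ("g" : String) ≤ "q" := by rw [String.le_iff_toList_le]; decide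
  have hpw : ys.Pairwise (fun a b => a ≤ b) := by
    rw [hys]
    refine List.pairwise_append.mpr ⟨List.pairwise_append.mpr ⟨?_, ?_, ?_⟩, ?_, ?_⟩
    · exact List.pairwise_replicate.mpr (Or.inr le_rfl)
    · exact List.pairwise_replicate.mpr (Or.inr le_rfl)
    · intro a ha b hb
      rw [List.eq_of_mem_replicate ha, List.eq_of_mem_replicate hb]; exact hXg
    · exact List.pairwise_replicate.mpr (Or.inr le_rfl)
    · intro a ha b hb
      rw [List.eq_of_mem_replicate hb]
      rcases List.mem_append.mp ha with ha | ha
      · rw [List.eq_of_mem_replicate ha]; exact hXq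
      · rw [List.eq_of_mem_replicate ha]; exact hgq
  rw [PySem.List.sorted_id_eq_of_perm_of_pairwise ls ys hperm hpw]
  rw [← String.toList_inj, PySem.Str.toList_join]
  have hmap : List.map String.toList ys =
      List.map (fun c => [c]) (List.replicate (ls.count "X") 'X' ++
        List.replicate (ls.count "g") 'g' ++ List.replicate (ls.count "q") 'q') := by
    simp [hys, List.map_append, List.map_replicate]
  rw [hmap, show ("" : String).toList = ([] : List Char) from rfl,
    PySem.Chars.join_nil_singletons]
  simp

-- ===== VERDICT (by name: the statement is the Claim_ definition above) =====
theorem get_hard_process_spec : Claim_equal_get_hard_process := by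
  intro pdg status flags _ _
  unfold Spec_get_hard_process get_hard_process get_hard_process_alt
  rw [pvLoop]
  have hmem : ∀ (st : Int) (x : String),
      x ∈ (((PySem.List.pyRange 0 pdg.length 1).filter
        (fun i => PySem.List.pyGetD status i 0 == st && has_flag (PySem.List.pyGetD flags i 0) 128)).map
        (fun i => PySem.List.pyGetD pdg i 0)).map pvLabelA →
      x = "X" ∨ x = "g" ∨ x = "q" := by
    intro st x hx
    rcases List.mem_map.mp hx with ⟨p, _, rfl⟩
    exact pvLabelA_cases p
  refine Prod.ext ?_ ?_
  · simpa [pvEmit, pvCnt] using pvSortJoin _ (hmem 21)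
  · simpa [pvEmit, pvCnt] using pvSortJoin _ (hmem 23)
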